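-- pv_equiv track=rewrite | github.com/forbighouse/llbc | test_script/veh_trust/trust_management_simulator.py | statistic_offset_count
-- ===== SOURCE A (Python) =====
-- def offset_rate_count(rating_each_list):
--     """
--     :param rating_each_list:
--     :return: 正面rating的数量，负面rating的数量
--     """
--     positive_num = 0
--     negative_num = 0
--     for num in rating_each_list:
--         if num == 1:
--             positive_num += 1
--         elif num == -1:
--             negative_num += 1
--
--     return [positive_num, negative_num]
--
-- def statistic_offset_count(accident_rating_dict):
--     pos_num_all = 0
--     neg_num_all = 0
--     for accident, rating_list in accident_rating_dict.items():
--         p_num, n_num = offset_rate_count(rating_list)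
--         pos_num_all += p_num
--         neg_num_all += n_num
--     return pos_num_all, neg_num_all
-- ===== SOURCE B (Python) =====
-- def statistic_offset_count(accident_rating_dict):
--     flat = [r for rating_list in accident_rating_dict.values() for r in rating_list]
--     return flat.count(1), flat.count(-1)
-- ===== Notes on version B (the rewrite author's own statement) =====
-- stated objective: idiomatic
-- what changed: Flattens all rating lists into one list and uses list.count(1)/count(-1) instead of the helper function with two guarded accumulators in nested loops.
import Mathlib
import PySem

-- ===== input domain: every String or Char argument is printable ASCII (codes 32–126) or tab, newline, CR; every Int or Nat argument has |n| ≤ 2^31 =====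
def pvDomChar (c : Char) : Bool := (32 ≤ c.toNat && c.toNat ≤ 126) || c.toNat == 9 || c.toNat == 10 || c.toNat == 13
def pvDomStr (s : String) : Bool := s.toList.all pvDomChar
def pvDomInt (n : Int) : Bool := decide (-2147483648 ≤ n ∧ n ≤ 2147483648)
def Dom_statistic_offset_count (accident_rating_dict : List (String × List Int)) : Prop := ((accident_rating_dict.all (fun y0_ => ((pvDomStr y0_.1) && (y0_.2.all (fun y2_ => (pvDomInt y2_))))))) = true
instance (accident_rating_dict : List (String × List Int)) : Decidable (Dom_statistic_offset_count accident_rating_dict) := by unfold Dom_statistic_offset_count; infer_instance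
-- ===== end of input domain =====

-- ===== PORT A =====
-- B flattens the dict's rating lists and counts 1s and -1s with list.count; idiomatic.
def offset_rate_count (rating_each_list : List Int) : List Int :=
  let r := rating_each_list.foldl
    (fun (acc : Int × Int) num =>
      if num == 1 then (acc.1 + 1, acc.2)
      else if num == -1 then (acc.1, acc.2 + 1)
      else acc) (0, 0)
  [r.1, r.2]

def statistic_offset_count (accident_rating_dict : List (String × List Int)) : Int × Int :=
  accident_rating_dict.foldl
    (fun (acc : Int × Int) kv =>
      match offset_rate_count kv.2 with
      | [p_num, n_num] => (acc.1 + p_num, acc.2 + n_num)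
      | _ => acc) (0, 0)

-- ===== PORT B =====
def statistic_offset_count_alt (accident_rating_dict : List (String × List Int)) : Int × Int :=
  let flat := accident_rating_dict.flatMap (fun kv => kv.2)
  (PySem.List.count flat 1, PySem.List.count flat (-1))

-- ===== PRECONDITION & SPEC =====
def Spec_statistic_offset_count (accident_rating_dict : List (String × List Int)) (out : Int × Int) : Prop := out = statistic_offset_count_alt accident_rating_dict
instance (accident_rating_dict : List (String × List Int)) (out : Int × Int) : Decidable (Spec_statistic_offset_count accident_rating_dict out) := by unfold Spec_statistic_offset_count; infer_instance

-- ===== CLAIM (what is proved, stated in full; the proofs are below) =====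
def Claim_equal_statistic_offset_count : Prop := ∀ (accident_rating_dict : List (String × List Int)), Dom_statistic_offset_count accident_rating_dict → Spec_statistic_offset_count accident_rating_dict (statistic_offset_count accident_rating_dict)

-- ===== LEMMAS AND PROOFS =====

-- ===== VERDICT (by name: the statement is the Claim_ definition above) =====
theorem inner_count (l : List Int) (a : Int × Int) :
    l.foldl (fun (acc : Int × Int) num =>
      if num == 1 then (acc.1 + 1, acc.2)
      else if num == -1 then (acc.1, acc.2 + 1)
      else acc) a = (a.1 + (l.count 1 : Int), a.2 + (l.count (-1) : Int)) := by
  induction l generalizing a with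
  | nil => simp
  | cons h t ih =>
    simp only [List.foldl_cons, ih]
    by_cases h1 : h = 1
    · subst h1; simp [List.count_cons]; ring
    · by_cases h2 : h = -1
      · subst h2; simp [h1]; ring
      · simp [h1, h2]

theorem offset_rate_count_eq (l : List Int) :
    offset_rate_count l = [(l.count 1 : Int), (l.count (-1) : Int)] := by
  unfold offset_rate_count
  rw [inner_count]
  simp

theorem simple_fold (t : List (String × List Int)) (a : Int × Int) :
    t.foldl (fun (acc : Int × Int) kv => (acc.1 + (kv.2.count 1 : Int), acc.2 + (kv.2.count (-1) : Int))) a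
    = (a.1 + ((t.flatMap (fun kv => kv.2)).count 1 : Int),
       a.2 + ((t.flatMap (fun kv => kv.2)).count (-1) : Int)) := by
  induction t generalizing a with
  | nil => simp
  | cons h t ih =>
    simp only [List.foldl_cons, ih, List.flatMap_cons, List.count_append]
    push_cast
    ring_nf

theorem outer_count (l : List (String × List Int)) (a : Int × Int) :
    l.foldl
      (fun (acc : Int × Int) kv =>
        match offset_rate_count kv.2 with
        | [p_num, n_num] => (acc.1 + p_num, acc.2 + n_num)
        | _ => acc) a
    = (a.1 + ((l.flatMap (fun kv => kv.2)).count 1 : Int),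
       a.2 + ((l.flatMap (fun kv => kv.2)).count (-1) : Int)) := by
  induction l generalizing a with
  | nil => simp
  | cons h t ih =>
    simp only [List.foldl_cons, offset_rate_count_eq, simple_fold, List.flatMap_cons,
      List.count_append]
    push_cast
    ring_nf

theorem statistic_offset_count_spec : Claim_equal_statistic_offset_count := by
  intro d _
  unfold Spec_statistic_offset_count statistic_offset_count statistic_offset_count_alt
  simp [outer_count, PySem.List.count_eq]
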